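-- pv_equiv track=rewrite | github.com/iajoiner/boston-crime-revisited | production/predict.py | min_with_null
-- ===== SOURCE A (Python) =====
-- def intize(string):
--     try:
--         num = int(string)
--         return num
--     except ValueError as e:
--         return None
--
-- def min_with_null(string_list):
--     res = None
--     is_nonnull = False
--     for string in string_list:
--         nullable_num = intize(string)
--         if isinstance(nullable_num, int):
--             if not is_nonnull:
--                 res = nullable_num
--                 is_nonnull = True
--             else:
--                 if res > nullable_num:
--                     res = nullable_num
--     return res
-- ===== SOURCE B (Python) =====
-- def intize(string):
--     try:
--         num = int(string)
--         return num
--     except ValueError as e: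
--         return None
--
-- def min_with_null(string_list):
--     nums = sorted(n for n in (intize(s) for s in string_list) if n is not None)
--     return nums[0] if nums else None
-- ===== Notes on version B (the rewrite author's own statement) =====
-- stated objective: alternative
-- what changed: Replaces the running-minimum accumulator loop by parsing into a list, sorting it, and returning the first element (sort-then-head instead of a comparison scan).
import Mathlib
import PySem

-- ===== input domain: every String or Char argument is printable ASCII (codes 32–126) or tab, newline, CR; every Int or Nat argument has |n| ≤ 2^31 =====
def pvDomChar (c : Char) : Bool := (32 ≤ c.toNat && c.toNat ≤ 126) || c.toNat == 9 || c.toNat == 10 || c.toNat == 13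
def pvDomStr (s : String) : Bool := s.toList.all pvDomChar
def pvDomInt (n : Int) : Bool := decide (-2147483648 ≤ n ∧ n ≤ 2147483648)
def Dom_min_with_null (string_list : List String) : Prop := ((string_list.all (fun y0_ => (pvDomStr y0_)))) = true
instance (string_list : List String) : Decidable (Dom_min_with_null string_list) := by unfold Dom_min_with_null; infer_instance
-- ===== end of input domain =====

-- B sorts the parsed ints and takes the head instead of A's running-minimum scan; same return value, no speed claim.

-- ===== PORT A =====
-- intize: int(string) catching ValueError → PySem.Int.ofStr? (none = ValueError)
-- loop body over the state (res : Option Int, is_nonnull : Bool)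
def mwnStep (st : Option Int × Bool) (s : String) : Option Int × Bool :=
  match PySem.Int.ofStr? s with
  | some n =>
    if !st.2 then (some n, true)
    else match st.1 with
         | some r => if r > n then (some n, st.2) else st
         | none => st
  | none => st

def min_with_null (string_list : List String) : Option Int :=
  (string_list.foldl mwnStep (none, false)).1

-- ===== PORT B =====
-- B: parse every string, sort the successfully parsed ints, return the first element
def min_with_null_alt (string_list : List String) : Option Int :=
  let nums := PySem.List.sorted (string_list.filterMap PySem.Int.ofStr?) (fun x => x) false
  match nums with
  | [] => none
  | m :: _ => some m

-- ===== PRECONDITION & SPEC =====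
def Spec_min_with_null (string_list : List String) (out : Option Int) : Prop := out = min_with_null_alt string_list
instance (string_list : List String) (out : Option Int) : Decidable (Spec_min_with_null string_list out) := by unfold Spec_min_with_null; infer_instance

-- ===== CLAIM =====
def Claim_equal_min_with_null : Prop := ∀ (string_list : List String), Dom_min_with_null string_list → Spec_min_with_null string_list (min_with_null string_list)

-- ===== LEMMAS AND PROOFS =====

-- loop invariant: once a value r is held, A's fold computes the running minimum of r and the remaining parsed ints
lemma loop_some (l : List String) : ∀ (r : Int),
    (l.foldl mwnStep (some r, true)).1
      = some ((l.filterMap PySem.Int.ofStr?).foldl min r) := by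
  induction l with
  | nil => intro r; simp
  | cons s t ih =>
    intro r
    cases h : PySem.Int.ofStr? s with
    | none => simp [List.foldl, mwnStep, h, ih]
    | some n =>
      by_cases hc : r > n
      · have hm : min r n = n := by omega
        simp [List.foldl, mwnStep, h, hc, ih, hm]
      · have hm : min r n = r := by omega
        simp [List.foldl, mwnStep, h, hc, ih, hm]

-- before the first parseable element the state stays (none, false)
lemma loop_none (l : List String) :
    (l.foldl mwnStep (none, false)).1
      = match l.filterMap PySem.Int.ofStr? with
        | [] => none
        | n :: t => some (t.foldl min n) := by
  induction l with
  | nil => simp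
  | cons s t ih =>
    cases h : PySem.Int.ofStr? s with
    | none => simpa [List.foldl, mwnStep, h] using ih
    | some n => simp [List.foldl, mwnStep, h, loop_some]

-- foldl min is a member of, and a lower bound of, n :: t
lemma foldl_min_mem (t : List Int) : ∀ n : Int, t.foldl min n ∈ n :: t := by
  induction t with
  | nil => simp
  | cons a t ih =>
    intro n
    have h := ih (min n a)
    simp only [List.foldl]
    rcases List.mem_cons.mp h with he | he
    · rcases min_cases n a with ⟨hm, _⟩ | ⟨hm, _⟩ <;> rw [he, hm] <;> simp
    · simp [he]

lemma foldl_min_seed_le (t : List Int) : ∀ n : Int, t.foldl min n ≤ n := by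
  induction t with
  | nil => simp
  | cons a t ih => intro n; exact le_trans (ih (min n a)) (min_le_left _ _)

lemma foldl_min_mem_le (t : List Int) : ∀ n y : Int, y ∈ t → t.foldl min n ≤ y := by
  induction t with
  | nil => simp
  | cons a t ih =>
    intro n y hy
    rcases List.mem_cons.mp hy with rfl | hy'
    · exact le_trans (foldl_min_seed_le t (min n y)) (min_le_right _ _)
    · exact ih (min n a) y hy'

lemma foldl_min_le (t : List Int) (n : Int) : ∀ y ∈ n :: t, t.foldl min n ≤ y := by
  intro y hy
  rcases List.mem_cons.mp hy with rfl | hy'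
  · exact foldl_min_seed_le t y
  · exact foldl_min_mem_le t n y hy'

theorem min_with_null_spec : Claim_equal_min_with_null := by
  intro sl _
  unfold Spec_min_with_null min_with_null min_with_null_alt
  rw [loop_none]
  cases hf : sl.filterMap PySem.Int.ofStr? with
  | nil => rfl
  | cons n t =>
    cases hs : PySem.List.sorted (n :: t) (fun x => x) false with
    | nil => exact absurd ((PySem.List.sorted_eq_nil_iff _ _ _).mp hs) (by simp)
    | cons m t' =>
      have hm_mem : m ∈ n :: t := by
        have : m ∈ PySem.List.sorted (n :: t) (fun x => x) false := by simp [hs]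
        exact (PySem.List.mem_sorted _ _ _ _).mp this
      have h1 : t.foldl min n ≤ m := foldl_min_le t n m hm_mem
      have h2 : m ≤ t.foldl min n :=
        PySem.List.key_head_sorted_le _ _ hs _ (foldl_min_mem t n)
      simp [le_antisymm h1 h2]
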